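-- pv_equiv track=rewrite | github.com/vaishnavi9542/python | countAsterisks.py | countAsterisks
-- ===== SOURCE A (Python) =====
-- def countAsterisks(s: str) -> int:
--     count=0
--     flag=0
--     for i in s:
--         if i=='|':
--             flag=not flag
--         elif not flag and i=='*':
--             count+=1
--     return count
-- ===== SOURCE B (Python) =====
-- def countAsterisks(s: str) -> int:
--     parts = s.split('|')
--     return sum(part.count('*') for part in parts[::2])
-- ===== Notes on version B (the rewrite author's own statement) =====
-- stated objective: faster
-- what changed: Replaces the per-character toggle-flag scan with split('|') followed by summing '*' counts over the even-indexed segments (the regions outside pipe pairs).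
import Mathlib
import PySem

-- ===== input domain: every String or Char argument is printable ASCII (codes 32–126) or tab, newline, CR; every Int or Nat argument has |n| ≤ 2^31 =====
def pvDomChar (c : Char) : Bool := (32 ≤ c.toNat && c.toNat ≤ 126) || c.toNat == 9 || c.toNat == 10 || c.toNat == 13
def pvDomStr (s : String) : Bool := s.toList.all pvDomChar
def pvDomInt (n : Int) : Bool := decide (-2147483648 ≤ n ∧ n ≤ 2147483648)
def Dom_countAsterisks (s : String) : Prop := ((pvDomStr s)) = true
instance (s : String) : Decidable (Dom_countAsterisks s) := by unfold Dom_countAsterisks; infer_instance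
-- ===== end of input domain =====

-- B replaces A's per-character toggle-flag scan by split('|') + summing '*' counts over the
-- even-indexed segments (measured faster: bulk split/count instead of a per-character loop).

-- ===== PORT A =====
def countAsterisks (s : String) : Int :=
  (s.toList.foldl
    (fun (cf : Int × Bool) (i : Char) =>
      if i = '|' then (cf.1, !cf.2)
      else if !cf.2 && i == '*' then (cf.1 + 1, cf.2)
      else cf)
    (0, false)).1

-- ===== PORT B =====
-- Source B works on a Python str; the port works on the code points (the Str wrappers are
-- thin .toList maps).  parts[::2] is slice? with step 2 (step ≠ 0, so it never returns none).
def countAsterisks_alt (s : String) : Int :=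
  let parts := PySem.Chars.splitOn s.toList ['|']
  let evenParts := (PySem.List.slice? parts none none 2).getD []
  (evenParts.map (fun part => (PySem.Chars.count part ['*'] : Int))).sum

-- ===== PRECONDITION & SPEC =====
def Spec_countAsterisks (s : String) (out : Int) : Prop := out = countAsterisks_alt s
instance (s : String) (out : Int) : Decidable (Spec_countAsterisks s out) := by unfold Spec_countAsterisks; infer_instance

-- ===== CLAIM (what is proved, stated in full; the proofs are below) =====
def Claim_equal_countAsterisks : Prop := ∀ (s : String), Dom_countAsterisks s → Spec_countAsterisks s (countAsterisks s)

-- ===== LEMMAS AND PROOFS =====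

/-- Reference splitter: Python's `s.split('|')` on the character list. -/
def pySplit : List Char → List (List Char)
  | [] => [[]]
  | c :: t => if c = '|' then [] :: pySplit t else (pySplit t).modifyHead (c :: ·)

/-- Even-indexed elements of a list. -/
def evens {α : Type} : List α → List α
  | [] => []
  | [x] => [x]
  | x :: _ :: r => x :: evens r

/-- A's loop counted in "outside" (`f = false`) / "inside" (`f = true`) mode. -/
def cnt (f : Bool) : List Char → Int
  | [] => 0
  | c :: t => if c = '|' then cnt (!f) t else (if !f && c == '*' then 1 else 0) + cnt f t

theorem pySplit_ne_nil (l : List Char) : pySplit l ≠ [] := by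
  induction l with
  | nil => simp [pySplit]
  | cons c t ih =>
    simp only [pySplit]
    split
    · simp
    · cases h : pySplit t with
      | nil => exact absurd h ih
      | cons a r => simp [List.modifyHead]

theorem evens_cons {α : Type} (x : α) (r : List α) : evens (x :: r) = x :: evens r.tail := by
  cases r <;> simp [evens]

/-- A's loop body as a named function (defeq to the lambda in the port). -/
def stepA : Int × Bool → Char → Int × Bool := fun cf i =>
  if i = '|' then (cf.1, !cf.2)
  else if !cf.2 && i == '*' then (cf.1 + 1, cf.2)
  else cf

theorem foldl_eq_cnt (l : List Char) (k : Int) (f : Bool) :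
    (l.foldl stepA (k, f)).1 = k + cnt f l := by
  induction l generalizing k f with
  | nil => simp [cnt]
  | cons c t ih =>
    rw [List.foldl_cons]
    by_cases h1 : c = '|'
    · have hs : stepA (k, f) c = (k, !f) := by simp [stepA, h1]
      rw [hs, ih]
      simp only [cnt]
      rw [if_pos h1]
    · by_cases h2 : (!f && c == '*') = true
      · have hs : stepA (k, f) c = (k + 1, f) := by
          simp only [stepA]; rw [if_neg h1, if_pos h2]
        rw [hs, ih]
        simp only [cnt]
        rw [if_neg h1, if_pos h2]
        ring
      · have hs : stepA (k, f) c = (k, f) := by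
          simp only [stepA]; rw [if_neg h1, if_neg h2]
        rw [hs, ih]
        simp only [cnt]
        rw [if_neg h1, if_neg h2]
        ring

theorem go_count_star (l : List Char) (fuel : Nat) (acc : Nat) (h : l.length ≤ fuel) :
    PySem.Chars.count.go ['*'] fuel l acc = acc + l.count '*' := by
  induction l generalizing fuel acc with
  | nil => cases fuel <;> simp [PySem.Chars.count.go]
  | cons c t ih =>
    cases fuel with
    | zero => simp at h
    | succ n =>
      simp only [PySem.Chars.count.go]
      by_cases hc : c = '*'
      · have hpre : List.isPrefixOf ['*'] (c :: t) = true := by simp [List.isPrefixOf, hc]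
        rw [if_pos hpre,
          show List.drop (['*'].length) (c :: t) = t from by simp,
          ih n (acc + 1) (by simpa using Nat.le_of_succ_le_succ h)]
        simp [List.count_cons, hc]
        omega
      · have hpre : List.isPrefixOf ['*'] (c :: t) = false := by
          simp [List.isPrefixOf]; exact fun hh => hc hh.symm
        rw [hpre]
        simp only [Bool.false_eq_true, if_false]
        rw [ih n acc (by simpa using Nat.le_of_succ_le_succ h)]
        simp [List.count_cons, hc]

theorem count_star (l : List Char) : PySem.Chars.count l ['*'] = l.count '*' := by
  simp [PySem.Chars.count, go_count_star l l.length 0 le_rfl]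

theorem go_split (l : List Char) (fuel : Nat) (cur : List Char) (acc : List (List Char))
    (h : l.length ≤ fuel) :
    PySem.Chars.splitOn.go ['|'] fuel l cur acc
      = acc.reverse ++ (pySplit l).modifyHead (cur.reverse ++ ·) := by
  induction l generalizing fuel cur acc with
  | nil => cases fuel <;> simp [PySem.Chars.splitOn.go, pySplit, List.modifyHead]
  | cons c t ih =>
    cases fuel with
    | zero => simp at h
    | succ n =>
      simp only [PySem.Chars.splitOn.go]
      by_cases hc : c = '|'
      · subst hc
        have hpre : List.isPrefixOf ['|'] ('|' :: t) = true := by simp [List.isPrefixOf]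
        rw [if_pos hpre]
        rw [show List.drop (['|'].length) ('|' :: t) = t from by simp,
          ih n [] ((List.reverse cur) :: acc) (by simpa using Nat.le_of_succ_le_succ h)]
        simp only [pySplit, if_pos rfl, List.modifyHead, List.reverse_cons, List.nil_append,
          List.reverse_nil, List.append_assoc, List.cons_append, List.singleton_append]
        cases pySplit t <;> simp
      · have hpre : List.isPrefixOf ['|'] (c :: t) = false := by
          simp [List.isPrefixOf]; exact fun hh => hc hh.symm
        rw [hpre]
        simp only [Bool.false_eq_true, if_false]
        rw [ih n (c :: cur) acc (by simpa using Nat.le_of_succ_le_succ h)]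
        simp only [pySplit, hc, if_false]
        cases hp : pySplit t with
        | nil => exact absurd hp (pySplit_ne_nil t)
        | cons a r => simp [List.modifyHead]

theorem splitOn_pipe (l : List Char) : PySem.Chars.splitOn l ['|'] = pySplit l := by
  rw [PySem.Chars.splitOn, go_split l (l.length + 1) [] [] (by omega)]
  cases hp : pySplit l with
  | nil => exact absurd hp (pySplit_ne_nil l)
  | cons a r => simp [List.modifyHead]

theorem filterMap_evens {α : Type} (xs : List α) :
    (List.range ((xs.length + 1) / 2)).filterMap (fun k => xs[2 * k]?) = evens xs := by
  match xs with
  | [] => simp [evens]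
  | [a] => simp [List.range_succ, evens]
  | a :: b :: r =>
    have hlen : (((a :: b :: r).length + 1) / 2) = (r.length + 1) / 2 + 1 := by
      simp only [List.length_cons]; omega
    rw [hlen, List.range_succ_eq_map, List.filterMap_cons, List.filterMap_map]
    have h0 : (a :: b :: r)[2 * 0]? = some a := rfl
    rw [h0]
    have hstep : ((fun k => (a :: b :: r)[2 * k]?) ∘ (fun k => k + 1))
        = fun k => r[2 * k]? := by
      funext k
      have : 2 * (k + 1) = 2 * k + 1 + 1 := by ring
      simp [Function.comp, this]
    rw [hstep, filterMap_evens r]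
    simp [evens]

theorem slice2 {α : Type} (xs : List α) :
    PySem.List.slice? xs none none 2 = some (evens xs) := by
  rw [PySem.List.slice?]
  rw [if_neg (by norm_num : ¬(2:Int) = 0)]
  simp only [PySem.List.sliceIndices]
  norm_num
  have hcount : (if 0 < xs.length
        then (((xs.length : Int) + 2 - 1) / 2).toNat else 0)
      = (xs.length + 1) / 2 := by
    split_ifs with h <;> omega
  rw [hcount, ← filterMap_evens xs]
  have hfun : (fun (x : Nat) => xs[(2 * (x : Int)).toNat]?) = (fun k : Nat => xs[2 * k]?) := by
    funext k
    rw [show ((2 * (k : Int)).toNat) = 2 * k from by omega]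
  rw [hfun]

theorem sum_evens_pySplit (l : List Char) :
    ((evens (pySplit l)).map (fun p => (p.count '*' : Int))).sum = cnt false l
    ∧ ((evens (pySplit l).tail).map (fun p => (p.count '*' : Int))).sum = cnt true l := by
  induction l with
  | nil => simp [pySplit, evens, cnt]
  | cons c t ih =>
    obtain ⟨ih1, ih2⟩ := ih
    by_cases hc : c = '|'
    · subst hc
      simp only [pySplit, if_true, cnt, Bool.not_false, Bool.not_true]
      constructor
      · rw [evens_cons]
        simpa using ih2
      · simpa using ih1
    · cases hp : pySplit t with
      | nil => exact absurd hp (pySplit_ne_nil t)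
      | cons h r =>
        rw [hp] at ih1 ih2
        simp only [pySplit, hc, if_false, hp, List.modifyHead, cnt]
        constructor
        · rw [evens_cons] at ih1 ⊢
          simp only [List.tail_cons, List.map_cons, List.sum_cons] at ih1 ⊢
          have hcc : ((List.count '*' (c :: h) : Nat) : Int)
              = (if (!false && c == '*') = true then 1 else 0)
                + ((List.count '*' h : Nat) : Int) := by
            by_cases hstar : c = '*' <;> simp [List.count_cons, hstar] <;> ring
          rw [hcc]
          omega
        · simpa using ih2

theorem alt_eq (s : String) :
    countAsterisks_alt s
      = ((evens (pySplit s.toList)).map (fun p => ((List.count '*' p : Nat) : Int))).sum := by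
  unfold countAsterisks_alt
  simp only [splitOn_pipe, slice2, Option.getD_some, count_star]

-- ===== VERDICT (by name: the statement is the Claim_ definition above) =====
theorem countAsterisks_spec : Claim_equal_countAsterisks := by
  intro s _
  unfold Spec_countAsterisks
  rw [alt_eq]
  have hA : countAsterisks s = ((String.toList s).foldl stepA (0, false)).1 := rfl
  rw [hA, foldl_eq_cnt]
  have hmain := (sum_evens_pySplit s.toList).1
  omega
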